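-- pv_equiv track=rewrite | github.com/Asz69420/autoquant-v2 | scripts/build_cycle_orders.py | pick_adjacent_timeframe
-- ===== SOURCE A (Python) =====
-- def pick_adjacent_timeframe(timeframe: str, available: list[str]) -> str | None:
--     ordering = ["15m", "1h", "4h", "1d"]
--     if timeframe not in ordering:
--         return None
--     idx = ordering.index(timeframe)
--     candidates = []
--     if idx > 0:
--         candidates.append(ordering[idx - 1])
--     if idx + 1 < len(ordering):
--         candidates.append(ordering[idx + 1])
--     for tf in candidates:
--         if tf in available:
--             return tf
--     return None
-- ===== SOURCE B (Python) =====
-- def pick_adjacent_timeframe(timeframe: str, available: list[str]) -> str | None: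
--     ordering = ["15m", "1h", "4h", "1d"]
--     for a, b in zip(ordering, ordering[1:]):
--         if b == timeframe and a in available:
--             return a
--         if a == timeframe and b in available:
--             return b
--     return None
-- ===== Notes on version B (the rewrite author's own statement) =====
-- stated objective: simpler
-- what changed: Replaces index lookup plus conditional candidate-list construction with a single sliding-window scan over consecutive ordering pairs: the pair (prev,tf) is met before (tf,next), which reproduces the prev-before-next preference, and an unknown timeframe matches no pair, removing the explicit membership guard and index arithmetic entirely.
import Mathlib
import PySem

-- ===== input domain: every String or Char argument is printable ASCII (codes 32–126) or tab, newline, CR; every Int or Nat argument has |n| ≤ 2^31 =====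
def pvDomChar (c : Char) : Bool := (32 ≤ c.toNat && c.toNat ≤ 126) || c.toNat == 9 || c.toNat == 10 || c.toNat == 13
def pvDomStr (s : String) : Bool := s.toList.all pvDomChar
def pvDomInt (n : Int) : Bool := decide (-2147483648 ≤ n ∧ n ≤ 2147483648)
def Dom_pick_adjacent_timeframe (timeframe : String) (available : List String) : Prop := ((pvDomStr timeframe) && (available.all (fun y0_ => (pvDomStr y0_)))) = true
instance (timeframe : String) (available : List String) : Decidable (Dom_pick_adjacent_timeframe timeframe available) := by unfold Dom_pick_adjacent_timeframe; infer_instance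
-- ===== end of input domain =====

-- B replaces A's index lookup and candidate-list construction with one sliding-window scan over consecutive ordering pairs (objective: simpler).

-- ===== PORT A =====
-- A's 'for tf in candidates: if tf in available: return tf' loop, transliterated.
def pvLoopA : List String → List String → Option String
  | [], _ => none
  | tf :: rest, available =>
      if available.contains tf then some tf else pvLoopA rest available

def pick_adjacent_timeframe (timeframe : String) (available : List String) : Option String :=
  let ordering : List String := ["15m", "1h", "4h", "1d"]
  if ¬ ordering.contains timeframe then none
  else
    match PySem.List.index? ordering timeframe with
    | none => none  -- unreachable: timeframe ∈ ordering
    | some idx =>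
      let candidates : List String :=
        (if 0 < idx then (PySem.List.pyGet? ordering (idx - 1)).toList else []) ++
        (if idx + 1 < (ordering.length : Int) then (PySem.List.pyGet? ordering (idx + 1)).toList else [])
      pvLoopA candidates available

-- ===== PORT B =====
-- B's 'for a, b in zip(ordering, ordering[1:])' pair scan, transliterated.
def pvPairScan (timeframe : String) (available : List String) : List (String × String) → Option String
  | [] => none
  | (a, b) :: rest =>
      if b == timeframe && available.contains a then some a
      else if a == timeframe && available.contains b then some b
      else pvPairScan timeframe available rest

def pick_adjacent_timeframe_alt (timeframe : String) (available : List String) : Option String :=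
  let ordering : List String := ["15m", "1h", "4h", "1d"]
  pvPairScan timeframe available (ordering.zip (ordering.drop 1))

-- ===== PRECONDITION & SPEC =====
def Spec_pick_adjacent_timeframe (timeframe : String) (available : List String) (out : Option String) : Prop := out = pick_adjacent_timeframe_alt timeframe available
instance (timeframe : String) (available : List String) (out : Option String) : Decidable (Spec_pick_adjacent_timeframe timeframe available out) := by unfold Spec_pick_adjacent_timeframe; infer_instance

-- ===== CLAIM (what is proved, stated in full; the proofs are below) =====
def Claim_equal_pick_adjacent_timeframe : Prop := ∀ (timeframe : String) (available : List String), Dom_pick_adjacent_timeframe timeframe available → Spec_pick_adjacent_timeframe timeframe available (pick_adjacent_timeframe timeframe available)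

-- ===== LEMMAS AND PROOFS =====

-- ===== VERDICT (by name: the statement is the Claim_ definition above) =====
theorem pick_adjacent_timeframe_spec : Claim_equal_pick_adjacent_timeframe := by
  intro timeframe available _
  unfold Spec_pick_adjacent_timeframe pick_adjacent_timeframe pick_adjacent_timeframe_alt
  by_cases h1 : timeframe = "15m"
  · subst h1; simp [PySem.List.index?, PySem.List.pyGet?, PySem.List.pyIdx?, List.idxOf?, List.findIdx?, List.findIdx?.go, pvLoopA, pvPairScan]
  by_cases h2 : timeframe = "1h"
  · subst h2; simp [PySem.List.index?, PySem.List.pyGet?, PySem.List.pyIdx?, List.idxOf?, List.findIdx?, List.findIdx?.go, pvLoopA, pvPairScan]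
  by_cases h3 : timeframe = "4h"
  · subst h3; simp [PySem.List.index?, PySem.List.pyGet?, PySem.List.pyIdx?, List.idxOf?, List.findIdx?, List.findIdx?.go, pvLoopA, pvPairScan]
  by_cases h4 : timeframe = "1d"
  · subst h4; simp [PySem.List.index?, PySem.List.pyGet?, PySem.List.pyIdx?, List.idxOf?, List.findIdx?, List.findIdx?.go, pvLoopA, pvPairScan]
  · simp [pvPairScan, h1, h2, h3, h4, Ne.symm h1, Ne.symm h2, Ne.symm h3, Ne.symm h4]
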